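-- pv_equiv track=rewrite | github.com/busebd12/InterviewPreparation | LeetCode/Python/Medium/1743-Restore-the-Array-From-Adjacent-Pairs/solution.py | count_unique_numbers
-- ===== SOURCE A (Python) =====
-- from typing import List
--
-- def count_unique_numbers(adjacentPairs: List[List[int]]) -> int:
--     seen: Set[int]=set()
--
--     for pair in adjacentPairs:
--         u: int=pair[0]
--
--         v: int=pair[1]
--
--         if u not in seen:
--             seen.add(u)
--
--         if v not in seen:
--             seen.add(v)
--
--     return len(seen)
-- ===== SOURCE B (Python) =====
-- from typing import List
--
-- def count_unique_numbers(adjacentPairs: List[List[int]]) -> int: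
--     values = sorted(x for pair in adjacentPairs for x in pair[:2])
--
--     if not values:
--         return 0
--
--     count = 1
--
--     for prev, cur in zip(values, values[1:]):
--         if cur != prev:
--             count += 1
--
--     return count
-- ===== Notes on version B (the rewrite author's own statement) =====
-- stated objective: alternative
-- what changed: Replaces the hash-set membership loop by flattening all pair endpoints, sorting them, and counting distinct values in one adjacent-comparison scan over the sorted list.
import Mathlib
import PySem

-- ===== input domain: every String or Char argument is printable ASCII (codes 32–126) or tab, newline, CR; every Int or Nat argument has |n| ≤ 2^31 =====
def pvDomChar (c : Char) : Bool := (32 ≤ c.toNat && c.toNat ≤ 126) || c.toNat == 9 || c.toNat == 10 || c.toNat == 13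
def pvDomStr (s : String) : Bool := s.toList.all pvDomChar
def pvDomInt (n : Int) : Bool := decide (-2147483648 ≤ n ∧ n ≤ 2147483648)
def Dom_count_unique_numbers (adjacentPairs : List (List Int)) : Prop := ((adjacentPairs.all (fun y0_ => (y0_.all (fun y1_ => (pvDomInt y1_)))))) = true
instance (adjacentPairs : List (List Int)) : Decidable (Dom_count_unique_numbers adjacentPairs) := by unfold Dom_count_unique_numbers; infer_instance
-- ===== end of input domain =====

-- B counts the distinct endpoints by sort-then-adjacent-scan instead of A's hash-set loop (alternative decomposition, same result).


-- ===== PORT A =====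
-- literal transliteration of A: a set 'seen', one pass over the pairs, add u then v if absent
def count_unique_numbers (adjacentPairs : List (List Int)) : Int :=
  let seen : PySem.Set Int :=
    adjacentPairs.foldl (fun seen pair =>
      let u : Int := PySem.List.pyGetD pair 0 0
      let v : Int := PySem.List.pyGetD pair 1 0
      let seen := if ¬ (PySem.Set.contains seen u) then PySem.Set.add seen u else seen
      if ¬ (PySem.Set.contains seen v) then PySem.Set.add seen v else seen) PySem.Set.empty
  PySem.Set.len seen

-- ===== PORT B =====
-- literal transliteration of B: flatten pair[:2], sort, count adjacent changes
def count_unique_numbers_alt (adjacentPairs : List (List Int)) : Int :=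
  let values : List Int :=
    PySem.List.sorted (adjacentPairs.flatMap (fun pair => PySem.List.slice pair none (some 2)))
      (fun x => x) false
  if values = [] then 0
  else
    (values.zip (values.drop 1)).foldl
      (fun count pc => if pc.2 ≠ pc.1 then count + 1 else count) (1 : Int)

-- ===== PRECONDITION & SPEC =====
-- Pre_ excludes exactly the inputs on which A raises IndexError: a pair with fewer than two elements.
def Pre_count_unique_numbers (adjacentPairs : List (List Int)) : Prop :=
  ∀ pair ∈ adjacentPairs, 2 ≤ pair.length
instance (adjacentPairs : List (List Int)) : Decidable (Pre_count_unique_numbers adjacentPairs) := by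
  unfold Pre_count_unique_numbers; infer_instance
def pvWitness_count_unique_numbers : List (List Int) := [[1, 2], [2, 3], [4, 4]]

def Spec_count_unique_numbers (adjacentPairs : List (List Int)) (out : Int) : Prop := out = count_unique_numbers_alt adjacentPairs
instance (adjacentPairs : List (List Int)) (out : Int) : Decidable (Spec_count_unique_numbers adjacentPairs out) := by unfold Spec_count_unique_numbers; infer_instance

-- ===== CLAIM (what is proved, stated in full; the proofs are below) =====
def Claim_equal_count_unique_numbers : Prop := ∀ (adjacentPairs : List (List Int)), Dom_count_unique_numbers adjacentPairs → Pre_count_unique_numbers adjacentPairs → Spec_count_unique_numbers adjacentPairs (count_unique_numbers adjacentPairs)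

-- ===== LEMMAS AND PROOFS =====

-- the flattened endpoint list (first two entries of each pair)
def pvFlat (adjacentPairs : List (List Int)) : List Int :=
  adjacentPairs.flatMap (fun pair => [PySem.List.pyGetD pair 0 0, PySem.List.pyGetD pair 1 0])

-- the branch 'if u not in seen: seen.add(u)' is Set.add
theorem pv_branch_add (s : PySem.Set Int) (u : Int) :
    (if ¬ (PySem.Set.contains s u) then PySem.Set.add s u else s) = PySem.Set.add s u := by
  by_cases h : u ∈ s
  · simp [PySem.Set.contains_eq_listContains, h]
  · simp [PySem.Set.contains_eq_listContains, h]

-- A's loop is Set.update with the flattened endpoint list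
theorem pv_foldA (adjacentPairs : List (List Int)) (s : PySem.Set Int) :
    adjacentPairs.foldl (fun seen pair =>
      PySem.Set.add (PySem.Set.add seen (PySem.List.pyGetD pair 0 0))
        (PySem.List.pyGetD pair 1 0)) s
    = PySem.Set.update s (pvFlat adjacentPairs) := by
  induction adjacentPairs generalizing s with
  | nil => simp [pvFlat, PySem.Set.update_nil]
  | cons p ps ih =>
      simp only [List.foldl_cons, pvFlat, List.flatMap_cons]
      rw [ih]
      simp [pvFlat, PySem.Set.update_cons]

-- under Pre_, pair[:2] is exactly [pair[0], pair[1]]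
theorem pv_flat_eq (adjacentPairs : List (List Int))
    (h : Pre_count_unique_numbers adjacentPairs) :
    adjacentPairs.flatMap (fun pair => PySem.List.slice pair none (some 2))
      = pvFlat adjacentPairs := by
  unfold pvFlat
  induction adjacentPairs with
  | nil => rfl
  | cons p ps ih =>
      have hp : 2 ≤ p.length := h p (by simp)
      match p, hp with
      | x :: y :: r, _ =>
        simp only [List.flatMap_cons]
        rw [ih (fun q hq => h q (by simp [hq]))]
        have : PySem.List.slice (x :: y :: r) none (some 2)
            = List.take 2 (x :: y :: r) := by
          have := PySem.List.slice_to_natCast (x :: y :: r) 2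
          simpa using this
        have h1 : PySem.List.pyGetD (x :: y :: r) 1 0 = y := by
          simp [pysem]
        simp [this, PySem.List.pyGetD_zero_cons, h1]

-- a Nodup list with the members of l has length l.toFinset.card
theorem pv_ofList_length (l : List Int) :
    ((PySem.Set.ofList l : PySem.Set Int).length : Int) = (l.toFinset.card : Int) := by
  have hn : (PySem.Set.ofList l : PySem.Set Int).Nodup := PySem.Set.nodup_ofList l
  have hfin : (PySem.Set.ofList l : PySem.Set Int).toFinset = l.toFinset := by
    ext x; simp [List.mem_toFinset, PySem.Set.mem_ofList]
  have := List.toFinset_card_of_nodup hn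
  rw [hfin] at this
  exact_mod_cast this.symm

-- the adjacent-scan on a ≤-sorted nonempty list counts its distinct elements
theorem pv_scan_count (t : List Int) :
    ∀ (a : Int) (c : Int), List.Pairwise (· ≤ ·) (a :: t) →
      ((a :: t).zip t).foldl (fun count pc => if pc.2 ≠ pc.1 then count + 1 else count) c
        = c + ((a :: t).toFinset.card : Int) - 1 := by
  induction t with
  | nil => intro a c _; simp
  | cons b t' ih =>
      intro a c hp
      have hp' : List.Pairwise (· ≤ ·) (b :: t') := hp.tail
      have hab : a ≤ b := (List.pairwise_cons.mp hp).1 b (by simp)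
      simp only [List.zip_cons_cons, List.foldl_cons]
      rw [ih b _ hp']
      by_cases h : a = b
      · subst h
        simp [List.toFinset_cons, Finset.insert_eq_self.mpr (by simp : a ∈ insert a t'.toFinset)]
      · have hnotmem : a ∉ b :: t' := by
          intro hmem
          cases hmem with
          | head => exact h rfl
          | tail _ hm =>
              exact h (le_antisymm hab ((List.pairwise_cons.mp hp').1 a hm))
        have hins : a ∉ insert b t'.toFinset := by
          simpa [List.mem_toFinset] using hnotmem
        rw [if_pos (show b ≠ a from fun hba => h hba.symm)]
        simp only [List.toFinset_cons]
        rw [Finset.card_insert_of_notMem hins]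
        push_cast
        ring

-- ===== VERDICT (by name: the statement is the Claim_ definition above) =====
theorem count_unique_numbers_spec : Claim_equal_count_unique_numbers := by
  intro adjacentPairs _ hpre
  unfold Spec_count_unique_numbers count_unique_numbers count_unique_numbers_alt
  simp only [pv_branch_add]
  rw [pv_foldA, pv_flat_eq adjacentPairs hpre]
  rw [show PySem.Set.update PySem.Set.empty (pvFlat adjacentPairs)
        = PySem.Set.ofList (pvFlat adjacentPairs) from PySem.Set.update_nil_left _]
  set L := pvFlat adjacentPairs with hL
  set s := PySem.List.sorted L (fun x => x) false with hs
  have hperm : s.Perm L := PySem.List.sorted_perm L _ _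
  have hfin : s.toFinset = L.toFinset := List.toFinset_eq_of_perm _ _ hperm
  by_cases hnil : s = []
  · have : L = [] := (PySem.List.sorted_eq_nil_iff L _ _).mp hnil
    simp [hnil, this, PySem.Set.len, PySem.Set.ofList_nil]
  · match s, hnil with
    | a :: t, _ =>
      have hpw : List.Pairwise (· ≤ ·) (a :: t) := by
        have := PySem.List.sorted_pairwise L (fun x : Int => x)
        rw [← hs] at this; exact this
      simp only [if_neg (by simp : ¬ (a :: t = []))]
      rw [List.drop_one, List.tail_cons, pv_scan_count t a 1 hpw]
      rw [PySem.Set.len, pv_ofList_length, ← hfin]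
      ring
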